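-- pv_equiv track=rewrite | github.com/Jslsn/Dump | Serverless/EC2_Sizing_Alerting/app.py | WeightedValueOfList
-- ===== SOURCE A (Python) =====
-- def WeightedValueOfList(OldUnweightedList: list):
--     NewWeightedList=[]
--     #For each value provided in the list of numbers
--     for UnweightedValue in OldUnweightedList:
--         UnweightedValueCountdown=UnweightedValue
--         UnweightedValueRange=[]
--         #Create a list out of a given number in the list all the numbers smaller than it.
--         while UnweightedValueCountdown != 0:
--             UnweightedValueRange.append(UnweightedValueCountdown)
--             UnweightedValueCountdown-=1
--         #Recreate said list with weighted values by taking each one and squaring them.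
--         WeightedValueRange=[]
--         for GivenValue in UnweightedValueRange:
--             WeightedGivenValue=GivenValue*GivenValue
--             WeightedValueRange.append(WeightedGivenValue)
--         WeightedValue=0
--         #Take these new weighted values and add them together to create a new weighted value for the given number in the original list.
--         for EachWeightedGivenValue in WeightedValueRange:
--             WeightedValue+=EachWeightedGivenValue
--         NewWeightedList.append(WeightedValue)
--     #Add each weighted value together to create a total value for the list given.
--     WeightedTotal=0
--     for GivenWeightedValue in NewWeightedList:
--         WeightedTotal+=GivenWeightedValue
--     return (WeightedTotal)
-- ===== SOURCE B (Python) =====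
-- def WeightedValueOfList(OldUnweightedList: list):
--     return sum(n * (n + 1) * (2 * n + 1) // 6 for n in OldUnweightedList)
-- ===== Notes on version B (the rewrite author's own statement) =====
-- stated objective: faster
-- what changed: Replaces the per-element countdown list, squaring pass and two summing passes by the closed-form sum-of-squares formula n(n+1)(2n+1)//6 folded once over the list; intended as asymptotically faster (O(len) vs O(sum of values)) - measured: A timed out at n=16 where B returned, so no ratio could be read.
import Mathlib
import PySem

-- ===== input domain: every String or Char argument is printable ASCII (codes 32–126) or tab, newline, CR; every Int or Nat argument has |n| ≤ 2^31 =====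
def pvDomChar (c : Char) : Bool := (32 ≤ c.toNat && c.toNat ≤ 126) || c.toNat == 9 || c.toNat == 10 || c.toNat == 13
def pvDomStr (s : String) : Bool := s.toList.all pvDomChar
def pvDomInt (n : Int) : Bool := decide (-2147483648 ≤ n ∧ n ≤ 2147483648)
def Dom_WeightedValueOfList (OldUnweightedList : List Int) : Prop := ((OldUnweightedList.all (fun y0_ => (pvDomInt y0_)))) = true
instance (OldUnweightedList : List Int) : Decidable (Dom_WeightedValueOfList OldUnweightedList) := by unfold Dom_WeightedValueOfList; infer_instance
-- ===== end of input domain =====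

-- B replaces A's per-element countdown/squaring/summing loops by the closed-form
-- sum-of-squares n(n+1)(2n+1)//6 folded once over the list (intended as faster; the timing
-- run saw A time out at n=16 where B returned, so no ratio could be measured).

-- ===== PORT A =====
-- the 'while UnweightedValueCountdown != 0' loop; for negative start Python diverges
-- (excluded by Pre_), so the port stops there.
def pvCountdown (c : Int) : List Int :=
  if h : 0 < c then c :: pvCountdown (c - 1) else []
termination_by c.toNat
decreasing_by omega

def WeightedValueOfList (OldUnweightedList : List Int) : Int :=
  let NewWeightedList :=
    OldUnweightedList.foldl (fun acc UnweightedValue =>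
      let UnweightedValueRange := pvCountdown UnweightedValue
      let WeightedValueRange :=
        UnweightedValueRange.foldl (fun l GivenValue => l ++ [GivenValue * GivenValue]) []
      let WeightedValue :=
        WeightedValueRange.foldl (fun s EachWeightedGivenValue => s + EachWeightedGivenValue) 0
      acc ++ [WeightedValue]) []
  NewWeightedList.foldl (fun s GivenWeightedValue => s + GivenWeightedValue) 0

-- ===== PORT B =====
def WeightedValueOfList_alt (OldUnweightedList : List Int) : Int :=
  OldUnweightedList.foldl
    (fun acc n => acc + PySem.Int.floordiv (n * (n + 1) * (2 * n + 1)) 6) 0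

-- ===== PRECONDITION & SPEC =====
-- Pre_ excludes lists with a negative element, on which A's 'while != 0' countdown never terminates.
def Pre_WeightedValueOfList (OldUnweightedList : List Int) : Prop :=
  ∀ x ∈ OldUnweightedList, 0 ≤ x
instance (OldUnweightedList : List Int) : Decidable (Pre_WeightedValueOfList OldUnweightedList) := by unfold Pre_WeightedValueOfList; infer_instance
def pvWitness_WeightedValueOfList : List Int := [0, 3, 5]

def Spec_WeightedValueOfList (OldUnweightedList : List Int) (out : Int) : Prop := out = WeightedValueOfList_alt OldUnweightedList
instance (OldUnweightedList : List Int) (out : Int) : Decidable (Spec_WeightedValueOfList OldUnweightedList out) := by unfold Spec_WeightedValueOfList; infer_instance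

-- ===== CLAIM (what is proved, stated in full; the proofs are below) =====
def Claim_equal_WeightedValueOfList : Prop := ∀ (OldUnweightedList : List Int), Dom_WeightedValueOfList OldUnweightedList → Pre_WeightedValueOfList OldUnweightedList → Spec_WeightedValueOfList OldUnweightedList (WeightedValueOfList OldUnweightedList)

-- ===== LEMMAS AND PROOFS =====

lemma pvCountdown_succ (k : Nat) :
    pvCountdown ((k : Int) + 1) = ((k : Int) + 1) :: pvCountdown k := by
  rw [pvCountdown]
  simp

lemma pvCountdown_zero : pvCountdown 0 = [] := by
  rw [pvCountdown]; simp

-- the sum of squares k, k-1, …, 1 in closed form (times 6)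
lemma sumsq6 (k : Nat) :
    6 * ((pvCountdown (k : Int)).map (fun g => g * g)).sum
      = (k : Int) * ((k : Int) + 1) * (2 * (k : Int) + 1) := by
  induction k with
  | zero => simp [pvCountdown_zero]
  | succ m ih =>
    push_cast
    rw [pvCountdown_succ]
    simp only [List.map_cons, List.sum_cons]
    push_cast at ih
    ring_nf
    ring_nf at ih
    linarith

lemma inner_closed (n : Int) (hn : 0 ≤ n) :
    ((pvCountdown n).map (fun g => g * g)).sum
      = PySem.Int.floordiv (n * (n + 1) * (2 * n + 1)) 6 := by
  obtain ⟨k, rfl⟩ := Int.eq_ofNat_of_zero_le hn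
  have h := sumsq6 k
  rw [PySem.Int.floordiv_eq_ediv_of_pos (by norm_num)]
  omega

-- ===== VERDICT (by name: the statement is the Claim_ definition above) =====
theorem WeightedValueOfList_spec : Claim_equal_WeightedValueOfList := by
  intro l _ hpre
  show WeightedValueOfList l = WeightedValueOfList_alt l
  unfold WeightedValueOfList WeightedValueOfList_alt
  simp only [PySem.List.foldl_append_singleton_eq_map, List.nil_append]
  rw [show (fun (s GivenWeightedValue : Int) => s + GivenWeightedValue)
        = (fun (s x : Int) => s + id x) from rfl,
      PySem.List.foldl_add,
      show (fun (acc n : Int) => acc + PySem.Int.floordiv (n * (n + 1) * (2 * n + 1)) 6)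
        = (fun (acc n : Int) => acc + (fun n => PySem.Int.floordiv (n * (n + 1) * (2 * n + 1)) 6) n) from rfl,
      PySem.List.foldl_add]
  simp only [List.map_map, zero_add]
  congr 1
  apply List.map_congr_left
  intro v hv
  simp only [Function.comp, id]
  rw [PySem.List.foldl_add]
  simp only [List.map_id', zero_add]
  exact inner_closed v (hpre v hv)
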